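-- pv_equiv track=rewrite | github.com/sequential-parameter-optimization/spotoptim | src/spotoptim/SpotOptim.py | get_stars
-- ===== SOURCE A (Python) =====
-- def get_stars(input_list: list) -> list:
--     """Converts a list of values to a list of stars.
--
--     Used to visualize the importance of a variable.
--     Thresholds: >99: ***, >75: **, >50: *, >10: .
--
--     Args:
--         input_list (list): A list of importance scores (0-100).
--
--     Returns:
--         list: A list of star strings.
--     """
--     output_list = []
--     for value in input_list:
--         if value > 99:
--             output_list.append("***")
--         elif value > 75:
--             output_list.append("**")
--         elif value > 50:
--             output_list.append("*")
--         elif value > 10: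
--             output_list.append(".")
--         else:
--             output_list.append("")
--     return output_list
-- ===== SOURCE B (Python) =====
-- _BOUNDS = [10, 50, 75, 99]
-- _OUTPUTS = ["", ".", "*", "**", "***"]
--
--
-- def get_stars(input_list: list) -> list:
--     """Converts a list of values to a list of stars via a threshold table
--     and binary search (bisect_left semantics), instead of an if/elif cascade."""
--     output_list = []
--     for value in input_list:
--         lo, hi = 0, len(_BOUNDS)
--         while lo < hi:
--             mid = (lo + hi) // 2
--             if _BOUNDS[mid] < value:
--                 lo = mid + 1
--             else:
--                 hi = mid
--         output_list.append(_OUTPUTS[lo])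
--     return output_list
-- ===== Notes on version B (the rewrite author's own statement) =====
-- stated objective: alternative
-- what changed: Replaced the if/elif threshold cascade with a sorted bounds table plus a parallel outputs table, selecting each star string by a hand-written bisect_left binary search over the bounds.
import Mathlib
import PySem

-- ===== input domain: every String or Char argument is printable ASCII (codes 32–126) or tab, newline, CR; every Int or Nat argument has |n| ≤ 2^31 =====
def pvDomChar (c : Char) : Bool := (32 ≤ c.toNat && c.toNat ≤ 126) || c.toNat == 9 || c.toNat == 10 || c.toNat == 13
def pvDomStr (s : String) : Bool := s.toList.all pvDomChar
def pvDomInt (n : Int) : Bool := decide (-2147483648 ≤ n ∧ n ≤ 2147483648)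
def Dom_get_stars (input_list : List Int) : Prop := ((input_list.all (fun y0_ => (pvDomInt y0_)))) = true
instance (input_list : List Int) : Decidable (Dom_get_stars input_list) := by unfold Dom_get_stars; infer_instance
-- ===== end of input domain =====

-- B replaces A's if/elif cascade by a threshold table with a binary search; equal output, no speed claim.

-- ===== PORT A =====
def get_stars (input_list : List Int) : List String :=
  input_list.foldl
    (fun output_list value =>
      if value > 99 then output_list ++ ["***"]
      else if value > 75 then output_list ++ ["**"]
      else if value > 50 then output_list ++ ["*"]
      else if value > 10 then output_list ++ ["."]
      else output_list ++ [""]) []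

-- ===== PORT B =====
def pvBounds : List Int := [10, 50, 75, 99]
def pvOutputs : List String := ["", ".", "*", "**", "***"]

-- the while-loop of Source B's binary search; fuel = hi - lo makes it structural, never exhausted on the real calls
def pvBisectGo (value : Int) (lo hi : Nat) : Nat → Nat
  | 0 => lo
  | fuel + 1 =>
    if lo < hi then
      let mid := (lo + hi) / 2
      if pvBounds.getD mid 0 < value then pvBisectGo value (mid + 1) hi fuel
      else pvBisectGo value lo mid fuel
    else lo

def get_stars_alt (input_list : List Int) : List String :=
  input_list.foldl
    (fun output_list value =>
      output_list ++ [pvOutputs.getD (pvBisectGo value 0 pvBounds.length pvBounds.length) ""]) []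

-- ===== PRECONDITION & SPEC =====
def Spec_get_stars (input_list : List Int) (out : List String) : Prop := out = get_stars_alt input_list
instance (input_list : List Int) (out : List String) : Decidable (Spec_get_stars input_list out) := by unfold Spec_get_stars; infer_instance

-- ===== CLAIM (what is proved, stated in full; the proofs are below) =====
def Claim_equal_get_stars : Prop := ∀ (input_list : List Int), Dom_get_stars input_list → Spec_get_stars input_list (get_stars input_list)

-- ===== LEMMAS AND PROOFS =====

-- per-element agreement: A's cascade equals B's table lookup
theorem pvStep_eq (value : Int) :
    (if value > 99 then "***"
     else if value > 75 then "**"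
     else if value > 50 then "*"
     else if value > 10 then "."
     else "") =
    pvOutputs.getD (pvBisectGo value 0 pvBounds.length pvBounds.length) "" := by
  by_cases h99 : (99:Int) < value <;> by_cases h75 : (75:Int) < value <;>
    by_cases h50 : (50:Int) < value <;> by_cases h10 : (10:Int) < value <;>
    first
      | omega
      | simp [pvBisectGo, pvBounds, pvOutputs, h99, h75, h50, h10]

theorem pvFold_eq (input_list : List Int) (acc : List String) :
    input_list.foldl
      (fun output_list value =>
        if value > 99 then output_list ++ ["***"]
        else if value > 75 then output_list ++ ["**"]
        else if value > 50 then output_list ++ ["*"]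
        else if value > 10 then output_list ++ ["."]
        else output_list ++ [""]) acc =
    input_list.foldl
      (fun output_list value =>
        output_list ++ [pvOutputs.getD (pvBisectGo value 0 pvBounds.length pvBounds.length) ""]) acc := by
  induction input_list generalizing acc with
  | nil => rfl
  | cons v t ih =>
    simp only [List.foldl]
    rw [← ih]
    congr 1
    have := pvStep_eq v
    split_ifs <;> simp_all

-- ===== VERDICT (by name: the statement is the Claim_ definition above) =====
theorem get_stars_spec : Claim_equal_get_stars := by
  intro input_list _
  unfold Spec_get_stars get_stars get_stars_alt
  exact pvFold_eq input_list []
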